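-- pv_equiv track=rewrite | github.com/nv259/CodeDaily | 3871-count-commas-in-range-ii/3871-count-commas-in-range-ii.py | countCommas
-- ===== SOURCE A (Python) =====
-- def countCommas(n: int) -> int:
--     ans = 0
--     base = 1_000
--     commas_used = 1
--
--     while base * 1_000 <= n:
--         num_cnt = base * 1_000 - base
--         ans += commas_used * num_cnt
--         base *= 1_000
--         commas_used += 1
--
--     if n >= base:
--         ans += (n - base + 1) * commas_used
--
--     return ans
-- ===== SOURCE B (Python) =====
-- def countCommas(n: int) -> int:
--     # Sum over comma thresholds: each number x >= t (t = 1000, 10**6, ...) gains one comma at t.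
--     ans = 0
--     t = 1000
--     while t <= n:
--         ans += n - t + 1
--         t *= 1000
--     return ans
-- ===== Notes on version B (the rewrite author's own statement) =====
-- stated objective: simpler
-- what changed: Replaces A's per-band accumulation (commas_used multiplier per full band plus a separate final partial-band branch) by a uniform sum over thresholds t = 1000^k of (n - t + 1), since every number >= t contributes exactly one comma at threshold t; the multiplier and the trailing if disappear.
import Mathlib
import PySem

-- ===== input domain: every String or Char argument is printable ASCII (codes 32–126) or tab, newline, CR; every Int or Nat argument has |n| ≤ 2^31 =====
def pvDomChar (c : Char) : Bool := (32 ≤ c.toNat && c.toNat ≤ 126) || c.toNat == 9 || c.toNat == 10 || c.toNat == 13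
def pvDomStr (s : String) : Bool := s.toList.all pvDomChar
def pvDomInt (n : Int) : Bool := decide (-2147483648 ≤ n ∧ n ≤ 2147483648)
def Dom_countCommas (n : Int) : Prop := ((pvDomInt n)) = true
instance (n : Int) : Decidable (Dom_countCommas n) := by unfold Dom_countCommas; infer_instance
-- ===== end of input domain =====

-- B replaces A's per-band count (commas_used * band size, plus a final partial-band branch)
-- by a uniform sum over thresholds t = 1000^k of (n - t + 1): objective 'simpler'.

-- ===== PORT A =====
-- the while loop of A; base is a Nat (in A it is always a positive power of 1000);
-- the 0 < base conjunct is a totality guard only (always true on A's calls)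
def pvLoopA (n : Int) (base : Nat) (ans commas : Int) : Nat × Int × Int :=
  if h : 0 < base ∧ (base : Int) * 1000 ≤ n then
    pvLoopA n (base * 1000) (ans + commas * ((base : Int) * 1000 - (base : Int))) (commas + 1)
  else (base, ans, commas)
termination_by n.toNat + 1 - base
decreasing_by
  obtain ⟨hb, hle⟩ := h
  have h1 : (base : Int) * 1000 ≤ (n.toNat : Int) := by omega
  have : base * 1000 ≤ n.toNat := by exact_mod_cast h1
  omega

def countCommas (n : Int) : Int :=
  let s := pvLoopA n 1000 0 1
  let base := s.1
  let ans := s.2.1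
  let commas_used := s.2.2
  if n ≥ (base : Int) then ans + (n - (base : Int) + 1) * commas_used else ans

-- ===== PORT B =====
-- the while loop of B; same totality guard 0 < t
def pvLoopB (n : Int) (t : Nat) (ans : Int) : Int :=
  if h : 0 < t ∧ (t : Int) ≤ n then
    pvLoopB n (t * 1000) (ans + n - (t : Int) + 1)
  else ans
termination_by n.toNat + 1 - t
decreasing_by
  obtain ⟨ht, hle⟩ := h
  have h1 : (t : Int) ≤ (n.toNat : Int) := by omega
  have : t ≤ n.toNat := by exact_mod_cast h1
  omega

def countCommas_alt (n : Int) : Int := pvLoopB n 1000 0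

-- ===== PRECONDITION & SPEC =====
def Spec_countCommas (n : Int) (out : Int) : Prop := out = countCommas_alt n
instance (n : Int) (out : Int) : Decidable (Spec_countCommas n out) := by unfold Spec_countCommas; infer_instance

-- ===== CLAIM (what is proved, stated in full; the proofs are below) =====
def Claim_equal_countCommas : Prop := ∀ (n : Int), Dom_countCommas n → Spec_countCommas n (countCommas n)

-- ===== LEMMAS AND PROOFS =====

theorem pvLoopB_shift (n : Int) (t : Nat) (a d : Int) :
    pvLoopB n t (a + d) = pvLoopB n t a + d := by
  unfold pvLoopB
  split_ifs with h
  · have ih := pvLoopB_shift n (t * 1000) (a + n - (t : Int) + 1) d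
    calc pvLoopB n (t * 1000) (a + d + n - (t : Int) + 1)
        = pvLoopB n (t * 1000) ((a + n - (t : Int) + 1) + d) := by ring_nf
      _ = pvLoopB n (t * 1000) (a + n - (t : Int) + 1) + d := ih
  · rfl
termination_by n.toNat + 1 - t
decreasing_by
  obtain ⟨ht, hle⟩ := h
  have h1 : (t : Int) ≤ (n.toNat : Int) := by omega
  have : t ≤ n.toNat := by exact_mod_cast h1
  omega

-- the loop invariant relating A's band sums to B's threshold sums
theorem pvLoop_rel (n : Int) (b : Nat) (a c : Int) (hb : 0 < b)
    (H : c = 1 ∨ (b : Int) ≤ n) :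
    (let s := pvLoopA n b a c
     if n ≥ (s.1 : Int) then s.2.1 + (n - (s.1 : Int) + 1) * s.2.2 else s.2.1)
    = pvLoopB n b a + (c - 1) * (n - (b : Int) + 1) := by
  by_cases h : (b : Int) * 1000 ≤ n
  · -- both loops recurse
    have hguardA : 0 < b ∧ (b : Int) * 1000 ≤ n := ⟨hb, h⟩
    have hbn : (b : Int) ≤ n := by nlinarith [Int.natCast_nonneg b]
    have hguardB : 0 < b ∧ (b : Int) ≤ n := ⟨hb, hbn⟩
    rw [pvLoopA, dif_pos hguardA]
    conv_rhs => rw [pvLoopB, dif_pos hguardB]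
    have ih := pvLoop_rel n (b * 1000) (a + c * ((b : Int) * 1000 - (b : Int))) (c + 1)
      (by positivity) (Or.inr (by push_cast; linarith))
    simp only at ih ⊢
    rw [ih]
    have e1 : (a + c * ((b : Int) * 1000 - (b : Int)))
        = (a + n - (b : Int) + 1) + (c * ((b : Int) * 1000 - (b : Int)) - (n - (b : Int) + 1)) := by ring
    rw [e1, pvLoopB_shift]
    push_cast
    ring
  · -- A's loop ends; B's loop does at most one more step
    rw [pvLoopA, dif_neg (by tauto)]
    simp only
    by_cases hbn : (b : Int) ≤ n
    · have hstop : ¬ (0 < b * 1000 ∧ ((b * 1000 : Nat) : Int) ≤ n) := by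
        push_cast; intro hc; exact h (by linarith [hc.2])
      conv_rhs => rw [pvLoopB, dif_pos ⟨hb, hbn⟩, pvLoopB, dif_neg hstop]
      rw [if_pos (by omega)]
      ring
    · rcases H with hc | hle
      · rw [pvLoopB, dif_neg (by tauto), if_neg (by omega), hc]
        ring
      · exact absurd hle hbn
termination_by n.toNat + 1 - b
decreasing_by
  have h1 : (b : Int) * 1000 ≤ (n.toNat : Int) := by omega
  have : b * 1000 ≤ n.toNat := by exact_mod_cast h1
  omega

-- ===== VERDICT (by name: the statement is the Claim_ definition above) =====
theorem countCommas_spec : Claim_equal_countCommas := by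
  intro n _
  unfold Spec_countCommas countCommas countCommas_alt
  have h := pvLoop_rel n 1000 0 1 (by norm_num) (Or.inl rfl)
  simp only at h ⊢
  rw [h]
  ring
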